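-- pv_equiv track=rewrite | github.com/Hypercart-Dev-Tools/rebalance-OS | src/rebalance/ingest/github_knowledge.py | _check_rollup
-- ===== SOURCE A (Python) =====
-- from typing import Any, Callable
--
-- def _check_rollup(check_runs: list[dict[str, Any]]) -> str:
--     if not check_runs:
--         return ""
--     if any((run.get("status") or "") != "completed" for run in check_runs):
--         return "pending"
--     conclusions = [(run.get("conclusion") or "").lower() for run in check_runs]
--     if any(
--         conclusion in {"failure", "timed_out", "cancelled", "startup_failure", "action_required", "stale"}
--         for conclusion in conclusions
--     ):
--         return "failing"
--     if all(conclusion in {"success", "neutral", "skipped"} for conclusion in conclusions):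
--         return "success"
--     return "mixed"
-- ===== SOURCE B (Python) =====
-- _FAILING = frozenset({"failure", "timed_out", "cancelled", "startup_failure", "action_required", "stale"})
-- _OK = frozenset({"success", "neutral", "skipped"})
--
--
-- def _severity(run):
--     if (run.get("status") or "") != "completed":
--         return 3
--     c = (run.get("conclusion") or "").lower()
--     if c in _FAILING:
--         return 2
--     if c in _OK:
--         return 0
--     return 1
--
--
-- def _check_rollup(check_runs):
--     if not check_runs:
--         return ""
--     return ["success", "mixed", "failing", "pending"][max(map(_severity, check_runs))]
-- ===== Notes on version B (the rewrite author's own statement) =====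
-- stated objective: alternative
-- what changed: Replaces A's cascade of separate any()/all() scans over the runs with one severity key function (pending=3, failing=2, mixed=1, success=0) and a single max-reduction, then indexes a result table.
import Mathlib
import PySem

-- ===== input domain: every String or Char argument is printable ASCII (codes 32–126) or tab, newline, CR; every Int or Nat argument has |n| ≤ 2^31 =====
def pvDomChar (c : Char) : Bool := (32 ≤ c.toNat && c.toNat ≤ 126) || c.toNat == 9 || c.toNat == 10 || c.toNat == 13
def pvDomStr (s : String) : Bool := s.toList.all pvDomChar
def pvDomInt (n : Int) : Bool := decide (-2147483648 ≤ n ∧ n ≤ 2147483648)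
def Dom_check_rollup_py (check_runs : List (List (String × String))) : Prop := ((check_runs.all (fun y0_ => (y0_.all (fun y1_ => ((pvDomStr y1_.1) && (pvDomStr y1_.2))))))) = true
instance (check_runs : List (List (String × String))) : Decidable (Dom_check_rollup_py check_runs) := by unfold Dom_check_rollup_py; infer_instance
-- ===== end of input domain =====

-- B replaces A's cascade of any()/all() scans with a per-run severity key and one max-reduction (alternative decomposition, same cost).
-- Shared literal constants and the `run.get(k) or ""` lookup (dict values are strings here, so `or ""` = get with default ""):
def pvFailSet : List String := ["failure", "timed_out", "cancelled", "startup_failure", "action_required", "stale"]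
def pvOkSet : List String := ["success", "neutral", "skipped"]
def pvLookup (run : List (String × String)) (k : String) : String := (PySem.Dict.ofList run).getD k ""

-- ===== PORT A =====
def check_rollup_py (check_runs : List (List (String × String))) : String :=
  if check_runs = [] then ""
  else if check_runs.any (fun run => pvLookup run "status" != "completed") then "pending"
  else
    let conclusions := check_runs.map (fun run => PySem.Str.lower (pvLookup run "conclusion"))
    if conclusions.any (fun c => pvFailSet.contains c) then "failing"
    else if conclusions.all (fun c => pvOkSet.contains c) then "success"
    else "mixed"

-- ===== PORT B =====
def pvSeverity (run : List (String × String)) : Int :=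
  if pvLookup run "status" != "completed" then 3
  else
    let c := PySem.Str.lower (pvLookup run "conclusion")
    if pvFailSet.contains c then 2
    else if pvOkSet.contains c then 0
    else 1

def check_rollup_py_alt (check_runs : List (List (String × String))) : String :=
  match check_runs with
  | [] => ""
  | r :: rs =>
    PySem.List.pyGetD ["success", "mixed", "failing", "pending"]
      (rs.foldl (fun acc run => max acc (pvSeverity run)) (pvSeverity r)) ""

-- ===== PRECONDITION & SPEC =====
def Spec_check_rollup_py (check_runs : List (List (String × String))) (out : String) : Prop := out = check_rollup_py_alt check_runs
instance (check_runs : List (List (String × String))) (out : String) : Decidable (Spec_check_rollup_py check_runs out) := by unfold Spec_check_rollup_py; infer_instance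

-- ===== CLAIM (what is proved, stated in full; the proofs are below) =====
def Claim_equal_check_rollup_py : Prop := ∀ (check_runs : List (List (String × String))), Dom_check_rollup_py check_runs → Spec_check_rollup_py check_runs (check_rollup_py check_runs)

-- ===== LEMMAS AND PROOFS =====

lemma pvSeverity_le_three (run : List (String × String)) : pvSeverity run ≤ 3 := by
  simp only [pvSeverity]; split_ifs <;> norm_num

lemma pvSeverity_bad {run : List (String × String)}
    (h : (pvLookup run "status" != "completed") = true) : pvSeverity run = 3 := by
  simp [pvSeverity, h]

lemma pvSeverity_good {run : List (String × String)}
    (h : (pvLookup run "status" != "completed") = false) :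
    pvSeverity run =
      (if pvFailSet.contains (PySem.Str.lower (pvLookup run "conclusion")) then 2
       else if pvOkSet.contains (PySem.Str.lower (pvLookup run "conclusion")) then (0 : Int)
       else 1) := by
  simp [pvSeverity, h]

lemma foldl_max_eq (rs : List (List (String × String))) (r : List (String × String)) (v : Int)
    (hex : ∃ x ∈ r :: rs, pvSeverity x = v)
    (hub : ∀ x ∈ r :: rs, pvSeverity x ≤ v) :
    rs.foldl (fun acc run => max acc (pvSeverity run)) (pvSeverity r) = v := by
  have hfold : rs.foldl (fun acc run => max acc (pvSeverity run)) (pvSeverity r)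
      = (rs.map pvSeverity).foldl max (pvSeverity r) := by
    rw [List.foldl_map]
  rw [hfold]
  apply le_antisymm
  · rcases PySem.List.foldl_max_mem (rs.map pvSeverity) (pvSeverity r) with h | h
    · rw [h]; exact hub r (List.mem_cons_self ..)
    · rcases List.mem_map.mp h with ⟨x, hx, hfx⟩
      rw [← hfx]; exact hub x (List.mem_cons_of_mem _ hx)
  · rcases hex with ⟨x, hx, hfx⟩
    rcases List.mem_cons.mp hx with rfl | hx
    · exact hfx ▸ (PySem.List.le_foldl_max (rs.map pvSeverity) (pvSeverity x)).1
    · exact hfx ▸ (PySem.List.le_foldl_max (rs.map pvSeverity) (pvSeverity r)).2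
        (pvSeverity x) (List.mem_map_of_mem hx)

lemma check_rollup_eq (check_runs : List (List (String × String))) :
    check_rollup_py check_runs = check_rollup_py_alt check_runs := by
  match check_runs with
  | [] => rfl
  | r :: rs =>
    have halt : check_rollup_py_alt (r :: rs)
        = PySem.List.pyGetD ["success", "mixed", "failing", "pending"]
            (rs.foldl (fun acc run => max acc (pvSeverity run)) (pvSeverity r)) "" := rfl
    by_cases hp : (r :: rs).any (fun run => pvLookup run "status" != "completed") = true
    · -- some run not completed: severity 3 somewhere, max = 3, both "pending"
      have hM : rs.foldl (fun acc run => max acc (pvSeverity run)) (pvSeverity r) = 3 := by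
        apply foldl_max_eq
        · rcases List.any_eq_true.mp hp with ⟨x, hx, hbx⟩
          exact ⟨x, hx, pvSeverity_bad hbx⟩
        · intro x _; exact pvSeverity_le_three x
      rw [halt, hM]
      simp only [check_rollup_py, if_neg (List.cons_ne_nil r rs)]
      rw [if_pos hp]
      decide
    · have hgood : ∀ x ∈ r :: rs, (pvLookup x "status" != "completed") = false := by
        intro x hx
        have := (List.any_eq_false (l := r :: rs)).mp (Bool.eq_false_iff.mpr hp) x hx
        exact Bool.eq_false_iff.mpr this
      by_cases hf : (r :: rs).any
          (fun run => pvFailSet.contains (PySem.Str.lower (pvLookup run "conclusion"))) = true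
      · -- some failing conclusion: max severity = 2, both "failing"
        have hf' : (((r :: rs).map
            (fun run => PySem.Str.lower (pvLookup run "conclusion"))).any
              (fun c => pvFailSet.contains c)) = true := by
          rw [List.any_map]; exact hf
        have hM : rs.foldl (fun acc run => max acc (pvSeverity run)) (pvSeverity r) = 2 := by
          apply foldl_max_eq
          · rcases List.any_eq_true.mp hf with ⟨x, hx, hbx⟩
            refine ⟨x, hx, ?_⟩
            rw [pvSeverity_good (hgood x hx), if_pos hbx]
          · intro x hx
            rw [pvSeverity_good (hgood x hx)]
            split_ifs <;> norm_num
        rw [halt, hM]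
        simp only [check_rollup_py, if_neg (List.cons_ne_nil r rs)]
        rw [if_neg hp, if_pos hf']
        decide
      · have hnofail : ∀ x ∈ r :: rs,
            pvFailSet.contains (PySem.Str.lower (pvLookup x "conclusion")) = false := by
          intro x hx
          have := (List.any_eq_false (l := r :: rs)).mp (Bool.eq_false_iff.mpr hf) x hx
          exact Bool.eq_false_iff.mpr this
        have hf' : ¬ (((r :: rs).map
            (fun run => PySem.Str.lower (pvLookup run "conclusion"))).any
              (fun c => pvFailSet.contains c)) = true := by
          rw [List.any_map]; exact hf
        by_cases hs : (r :: rs).all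
            (fun run => pvOkSet.contains (PySem.Str.lower (pvLookup run "conclusion"))) = true
        · -- all ok conclusions: every severity 0, both "success"
          have hs' : (((r :: rs).map
              (fun run => PySem.Str.lower (pvLookup run "conclusion"))).all
                (fun c => pvOkSet.contains c)) = true := by
            rw [List.all_map]; exact hs
          have hzero : ∀ x ∈ r :: rs, pvSeverity x = 0 := by
            intro x hx
            rw [pvSeverity_good (hgood x hx), if_neg (by rw [hnofail x hx]; simp),
              if_pos (List.all_eq_true.mp hs x hx)]
          have hM : rs.foldl (fun acc run => max acc (pvSeverity run)) (pvSeverity r) = 0 :=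
            foldl_max_eq rs r 0 ⟨r, List.mem_cons_self .., hzero r (List.mem_cons_self ..)⟩
              (fun x hx => le_of_eq (hzero x hx))
          rw [halt, hM]
          simp only [check_rollup_py, if_neg (List.cons_ne_nil r rs)]
          rw [if_neg hp, if_neg hf', if_pos hs']
          decide
        · -- otherwise: some severity 1, none above 1, both "mixed"
          have hs' : ¬ (((r :: rs).map
              (fun run => PySem.Str.lower (pvLookup run "conclusion"))).all
                (fun c => pvOkSet.contains c)) = true := by
            rw [List.all_map]; exact hs
          have hM : rs.foldl (fun acc run => max acc (pvSeverity run)) (pvSeverity r) = 1 := by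
            apply foldl_max_eq
            · rcases List.all_eq_false.mp (Bool.eq_false_iff.mpr hs) with ⟨x, hx, hnok⟩
              refine ⟨x, hx, ?_⟩
              rw [pvSeverity_good (hgood x hx), if_neg (by rw [hnofail x hx]; simp),
                if_neg hnok]
            · intro x hx
              rw [pvSeverity_good (hgood x hx), if_neg (by rw [hnofail x hx]; simp)]
              split_ifs <;> norm_num
          rw [halt, hM]
          simp only [check_rollup_py, if_neg (List.cons_ne_nil r rs)]
          rw [if_neg hp, if_neg hf', if_neg hs']
          decide

-- ===== VERDICT (by name: the statement is the Claim_ definition above) =====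
theorem check_rollup_py_spec : Claim_equal_check_rollup_py := by
  intro check_runs _
  exact check_rollup_eq check_runs
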